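-- pv_equiv track=rewrite | github.com/StudentGenZer/Lab | lab_1/SROM_LAB_1.py | convert_rev
-- ===== SOURCE A (Python) =====
-- def convert_rev(A = []):
--     stek = 0
--     count = 0
--     for i in range(len(A)-1,-1,-1):
--         if A[i] !=0:
--             break
--         else:
--             count+=1
--     for i in range(len(A)-count-1,-1,-1):
--         stek+= A[i]*(16**i)
--     return stek
-- ===== SOURCE B (Python) =====
-- def convert_rev(A = []):
--     stek = 0
--     for a in reversed(A):
--         stek = stek * 16 + a
--     return stek
-- ===== Notes on version B (the rewrite author's own statement) =====
-- stated objective: faster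
-- what changed: Replaces the trailing-zero-counting scan plus a sum of A[i]*16**i (one big exponentiation per element) with a single Horner multiply-accumulate pass over the reversed list.
import Mathlib
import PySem

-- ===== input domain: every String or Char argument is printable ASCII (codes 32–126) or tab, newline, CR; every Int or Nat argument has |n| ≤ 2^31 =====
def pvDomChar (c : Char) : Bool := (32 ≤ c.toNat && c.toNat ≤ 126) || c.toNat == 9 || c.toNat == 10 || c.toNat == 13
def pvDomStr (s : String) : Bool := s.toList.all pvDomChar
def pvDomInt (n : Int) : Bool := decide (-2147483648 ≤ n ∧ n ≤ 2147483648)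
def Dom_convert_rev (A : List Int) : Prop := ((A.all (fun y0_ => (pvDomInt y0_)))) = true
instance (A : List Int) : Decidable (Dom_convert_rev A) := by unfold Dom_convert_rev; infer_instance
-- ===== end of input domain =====

-- B replaces A's trailing-zero scan + per-index 16**i sum with one Horner multiply-accumulate pass (faster asymptotically in a timing run's mechanism: no repeated exponentiation).


-- ===== PORT A =====
-- first loop: for i in range(len(A)-1,-1,-1): break on A[i] != 0 else count += 1
-- cntA A n scans indices n-1, n-2, … while the elements are zero (break = return 0 added so far)
def cntA (A : List Int) : Nat → Nat
  | 0 => 0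
  | n + 1 => if A.getD n 0 ≠ 0 then 0 else cntA A n + 1

-- second loop: for i in range(len(A)-count-1,-1,-1): stek += A[i]*(16**i)
def sumA (A : List Int) : Nat → Int
  | 0 => 0
  | i + 1 => A.getD i 0 * (16 : Int) ^ i + sumA A i

def convert_rev (A : List Int) : Int :=
  let count := cntA A A.length
  sumA A (A.length - count)

-- ===== PORT B =====
def convert_rev_alt (A : List Int) : Int :=
  A.reverse.foldl (fun stek a => stek * 16 + a) 0

-- ===== PRECONDITION & SPEC =====
def Spec_convert_rev (A : List Int) (out : Int) : Prop := out = convert_rev_alt A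
instance (A : List Int) (out : Int) : Decidable (Spec_convert_rev A out) := by unfold Spec_convert_rev; infer_instance

-- ===== CLAIM (what is proved, stated in full; the proofs are below) =====
def Claim_equal_convert_rev : Prop := ∀ (A : List Int), Dom_convert_rev A → Spec_convert_rev A (convert_rev A)

-- ===== LEMMAS AND PROOFS =====

-- the base-16 polynomial value of a list (least-significant first)
def poly : List Int → Int
  | [] => 0
  | a :: t => poly t * 16 + a

theorem poly_eq_foldr (A : List Int) :
    poly A = A.foldr (fun a s => s * 16 + a) 0 := by
  induction A with
  | nil => rfl
  | cons a t ih => simp [poly, ih]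

theorem alt_eq_poly (A : List Int) : convert_rev_alt A = poly A := by
  simp [convert_rev_alt, List.foldl_reverse, poly_eq_foldr]

theorem poly_append (l m : List Int) :
    poly (l ++ m) = poly l + 16 ^ l.length * poly m := by
  induction l with
  | nil => simp [poly]
  | cons a t ih => simp [poly, ih, pow_succ]; ring

theorem poly_zero (l : List Int) (h : ∀ x ∈ l, x = 0) : poly l = 0 := by
  induction l with
  | nil => rfl
  | cons a t ih =>
    have ha : a = 0 := h a (by simp)
    have ht : poly t = 0 := ih (fun x hx => h x (by simp [hx]))
    simp [poly, ha, ht]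

-- sumA A n is the polynomial value of the first n elements
theorem sumA_eq_poly_take (A : List Int) (n : Nat) (hn : n ≤ A.length) :
    sumA A n = poly (A.take n) := by
  induction n with
  | zero => simp [sumA, poly]
  | succ k ih =>
    have hk : k < A.length := Nat.lt_of_succ_le hn
    have htake : A.take (k + 1) = A.take k ++ [A.getD k 0] := by
      rw [List.getD_eq_getElem A 0 hk]
      rw [List.take_succ, List.getElem?_eq_getElem hk]
      rfl
    rw [sumA, htake, poly_append, ih (Nat.le_of_lt hk)]
    simp [poly, List.length_take, Nat.min_eq_left (Nat.le_of_lt hk)]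
    ring

-- every element at index ≥ n - cntA A n (and < n) is zero
theorem cntA_zeros (A : List Int) (n : Nat) :
    cntA A n ≤ n ∧ ∀ i, n - cntA A n ≤ i → i < n → A.getD i 0 = 0 := by
  induction n with
  | zero => exact ⟨Nat.le_refl 0, fun i h1 h2 => absurd h2 (Nat.not_lt_zero i)⟩
  | succ k ih =>
    by_cases hz : A.getD k 0 ≠ 0
    · have hz' : ¬ (A[k]?.getD 0 = 0) := hz
      refine ⟨by simp [cntA, hz'], fun i h1 h2 => ?_⟩
      simp [cntA, hz'] at h1
      omega
    · push_neg at hz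
      have hz' : A[k]?.getD 0 = 0 := hz
      have hcnt : cntA A (k + 1) = cntA A k + 1 := by simp [cntA, hz']
      refine ⟨by omega, fun i h1 h2 => ?_⟩
      rw [hcnt] at h1
      rcases Nat.lt_or_ge i k with hik | hik
      · exact ih.2 i (by omega) hik
      · have : i = k := by omega
        rw [this]; exact hz

theorem convert_rev_eq_poly (A : List Int) : convert_rev A = poly A := by
  have hz := cntA_zeros A A.length
  set c := cntA A A.length with hc
  have hle : A.length - c ≤ A.length := Nat.sub_le _ _
  have hdrop : ∀ x ∈ A.drop (A.length - c), x = 0 := by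
    intro x hx
    obtain ⟨j, hj, hget⟩ := List.getElem_of_mem hx
    rw [List.getElem_drop] at hget
    have hlt : A.length - c + j < A.length := by
      have := hj; simp [List.length_drop] at this; omega
    have := hz.2 (A.length - c + j) (by omega) hlt
    rw [List.getD_eq_getElem A 0 hlt] at this
    rw [← hget]; exact this
  have hsplit : poly A = poly (A.take (A.length - c)) := by
    conv_lhs => rw [← List.take_append_drop (A.length - c) A]
    rw [poly_append, poly_zero _ hdrop]
    ring
  unfold convert_rev
  rw [← hc, sumA_eq_poly_take A _ hle, hsplit]

-- ===== VERDICT (by name: the statement is the Claim_ definition above) =====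
theorem convert_rev_spec : Claim_equal_convert_rev := by
  intro A _
  unfold Spec_convert_rev
  rw [alt_eq_poly, convert_rev_eq_poly]
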